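-- pv_equiv track=rewrite | github.com/harry-samuels/DoplingEvolution | display.py | stitchDisplays
-- ===== SOURCE A (Python) =====
-- def stitchDisplays(display1, display2):
--     #check different versions of [] inputs
--     if not display1:
--         return display2
--     elif not display2:
--         return display1
--
--     line= display1.pop(0) + "  " + display2.pop(0)
--
--     lowerDisplay= stitchDisplays(display1, display2)
--     lowerDisplay.insert(0, line)
--     return lowerDisplay
-- ===== SOURCE B (Python) =====
-- def stitchDisplays(display1, display2):
--     out = [a + "  " + b for a, b in zip(display1, display2)]
--     n = len(out)
--     return out + display1[n:] + display2[n:]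
-- ===== Notes on version B (the rewrite author's own statement) =====
-- stated objective: faster
-- what changed: Replaced A's recursion that pops both heads and re-inserts the stitched line at index 0 (each pop(0)/insert(0) is O(n), recursion depth n) with a single linear pass: zip the common prefix into stitched lines, then append the remainder slices of both lists.
import Mathlib
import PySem

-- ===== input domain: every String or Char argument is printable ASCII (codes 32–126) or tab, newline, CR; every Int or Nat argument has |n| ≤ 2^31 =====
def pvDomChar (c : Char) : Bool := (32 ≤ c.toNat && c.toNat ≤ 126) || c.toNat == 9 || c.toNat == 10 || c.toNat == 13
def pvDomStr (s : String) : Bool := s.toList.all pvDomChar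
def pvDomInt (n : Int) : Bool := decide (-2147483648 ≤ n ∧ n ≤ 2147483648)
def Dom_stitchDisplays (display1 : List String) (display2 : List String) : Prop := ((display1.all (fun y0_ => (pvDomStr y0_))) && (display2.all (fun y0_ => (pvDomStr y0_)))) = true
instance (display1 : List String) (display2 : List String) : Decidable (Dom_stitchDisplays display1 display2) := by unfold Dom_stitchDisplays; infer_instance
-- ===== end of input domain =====

-- B replaces A's quadratic pop(0)/insert(0) recursion by one linear zip pass plus the
-- remainder slices (return value only: A mutates its argument lists in place, B does not).

-- ===== PORT A =====
-- A: recursion that pops the two heads, stitches them, recurses, and re-inserts at front.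
def stitchDisplays (display1 : List String) (display2 : List String) : List String :=
  match display1, display2 with
  | [], _ => display2
  | _, [] => display1
  | h1 :: t1, h2 :: t2 =>
      let line := h1 ++ "  " ++ h2
      let lowerDisplay := stitchDisplays t1 t2
      line :: lowerDisplay

-- ===== PORT B =====
-- B: zip the common prefix, then append both remainder slices (one of which is empty).
def stitchDisplays_alt (display1 : List String) (display2 : List String) : List String :=
  let out := List.zipWith (fun a b => a ++ "  " ++ b) display1 display2
  let n : Int := out.length
  out ++ PySem.List.slice display1 (some n) none ++ PySem.List.slice display2 (some n) none

-- ===== PRECONDITION & SPEC =====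
def Spec_stitchDisplays (display1 : List String) (display2 : List String) (out : List String) : Prop := out = stitchDisplays_alt display1 display2
instance (display1 : List String) (display2 : List String) (out : List String) : Decidable (Spec_stitchDisplays display1 display2 out) := by unfold Spec_stitchDisplays; infer_instance

-- ===== CLAIM (what is proved, stated in full; the proofs are below) =====
def Claim_equal_stitchDisplays : Prop := ∀ (display1 : List String) (display2 : List String), Dom_stitchDisplays display1 display2 → Spec_stitchDisplays display1 display2 (stitchDisplays display1 display2)

-- ===== LEMMAS AND PROOFS =====

theorem stitchDisplays_eq_alt (display1 display2 : List String) :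
    stitchDisplays display1 display2 = stitchDisplays_alt display1 display2 := by
  induction display1 generalizing display2 with
  | nil =>
      simp [stitchDisplays, stitchDisplays_alt, PySem.List.slice_from_natCast]
  | cons h1 t1 ih =>
      cases display2 with
      | nil =>
          simp [stitchDisplays, stitchDisplays_alt, PySem.List.slice_from_natCast]
      | cons h2 t2 =>
          simp only [stitchDisplays, stitchDisplays_alt, List.zipWith_cons_cons,
            List.length_cons, ih t2, PySem.List.slice_from_natCast, List.drop_succ_cons]
          simp

-- ===== VERDICT (by name: the statement is the Claim_ definition above) =====
theorem stitchDisplays_spec : Claim_equal_stitchDisplays := by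
  intro d1 d2 _
  exact stitchDisplays_eq_alt d1 d2
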